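-- pv_equiv track=rewrite | github.com/bentaps/nmai-astar-island | astar/inference.py | full_coverage_tiling
-- ===== SOURCE A (Python) =====
-- def full_coverage_tiling(H: int = 40, W: int = 40, vp: int = 15) -> list[tuple]:
--     """Generate viewport positions for full map coverage.
--
--     Produces a 3×3 grid of 15×15 viewports (with edge overlap) that
--     covers the entire map using exactly 9 queries per seed.
--
--     Returns:
--         List of (x, y, w, h) tuples.
--     """
--     def tile_starts(dim: int, vp_size: int) -> list[int]:
--         starts = [0]
--         pos = 0
--         while pos + vp_size < dim:
--             pos = min(pos + vp_size, dim - vp_size)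
--             if pos not in starts:
--                 starts.append(pos)
--         return starts
--
--     viewports = []
--     for y in tile_starts(H, vp):
--         for x in tile_starts(W, vp):
--             viewports.append((x, y, min(vp, W - x), min(vp, H - y)))
--     return viewports
-- ===== SOURCE B (Python) =====
-- def full_coverage_tiling(H: int = 40, W: int = 40, vp: int = 15) -> list[tuple]:
--     def tile_starts(dim: int, vp_size: int) -> list[int]:
--         if dim <= vp_size:
--             return [0]
--         last = dim - vp_size
--         n = -(-last // vp_size)  # ceil(last / vp_size): number of full-step starts
--         return [i * vp_size for i in range(n)] + [last]
--     return [(x, y, min(vp, W - x), min(vp, H - y))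
--             for y in tile_starts(H, vp)
--             for x in tile_starts(W, vp)]
-- ===== Notes on version B (the rewrite author's own statement) =====
-- stated objective: faster
-- what changed: Replaces the incremental clamping while-loop with its linear 'pos not in starts' membership scan by a closed-form tile count n = ceil((dim-vp)/vp) and direct generation [i*vp for i in range(n)] + [dim-vp].
import Mathlib
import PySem

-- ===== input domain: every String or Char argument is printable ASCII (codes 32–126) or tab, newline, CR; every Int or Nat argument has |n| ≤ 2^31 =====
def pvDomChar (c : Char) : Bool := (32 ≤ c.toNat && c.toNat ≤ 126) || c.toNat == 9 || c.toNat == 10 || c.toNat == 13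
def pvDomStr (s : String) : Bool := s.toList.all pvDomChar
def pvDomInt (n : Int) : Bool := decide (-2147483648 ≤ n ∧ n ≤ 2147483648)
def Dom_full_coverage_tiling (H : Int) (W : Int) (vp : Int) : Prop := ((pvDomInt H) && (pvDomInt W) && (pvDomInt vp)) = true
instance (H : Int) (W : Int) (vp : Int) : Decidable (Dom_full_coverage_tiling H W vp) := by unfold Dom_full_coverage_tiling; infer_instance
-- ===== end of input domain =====

-- B replaces A's incremental clamping while-loop (with a linear membership scan per step)
-- by a closed-form ceil-division tile count and direct generation of the start list;
-- A rescans the start list each step (quadratic in tile count per dimension), B does not.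


-- ===== PORT A =====
-- the 'while pos + vp_size < dim' loop of A's tile_starts, with fuel (the Python loop
-- diverges when vp ≤ 0 < dim; Pre_ excludes exactly those inputs, and on Pre_ the fuel
-- dim.toNat + 1 is more than the number of iterations, so the port is exact there)
def pvTileLoop (dim vp : Int) : Nat → Int → List Int → List Int
  | 0, _, starts => starts
  | fuel+1, pos, starts =>
    if pos + vp < dim then
      let pos' := min (pos + vp) (dim - vp)
      pvTileLoop dim vp fuel pos' (if pos' ∈ starts then starts else starts ++ [pos'])
    else starts

def pvTileStartsA (dim vp : Int) : List Int :=
  pvTileLoop dim vp (dim.toNat + 1) 0 [0]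

def full_coverage_tiling (H : Int) (W : Int) (vp : Int) : List (Int × Int × Int × Int) :=
  (pvTileStartsA H vp).foldl (fun acc y =>
    (pvTileStartsA W vp).foldl
      (fun acc2 x => acc2 ++ [(x, y, min vp (W - x), min vp (H - y))]) acc) []

-- ===== PORT B =====
-- closed-form start list: [i*vp for i in range(ceil((dim-vp)/vp))] + [dim-vp]
def pvTileStartsB (dim vp : Int) : List Int :=
  if dim ≤ vp then [0]
  else
    let last := dim - vp
    let n := -(PySem.Int.floordiv (-last) vp)
    ((PySem.List.pyRange 0 n 1).map (fun i => i * vp)) ++ [last]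

def full_coverage_tiling_alt (H : Int) (W : Int) (vp : Int) : List (Int × Int × Int × Int) :=
  (pvTileStartsB H vp).flatMap (fun y =>
    (pvTileStartsB W vp).map (fun x => (x, y, min vp (W - x), min vp (H - y))))

-- ===== PRECONDITION & SPEC =====
-- Pre_ excludes exactly the inputs on which Python A DIVERGES (while-loop never
-- terminates): vp ≤ 0 together with vp < H or vp < W. A returns on every other input.
def Pre_full_coverage_tiling (H : Int) (W : Int) (vp : Int) : Prop :=
  1 ≤ vp ∨ (H ≤ vp ∧ W ≤ vp)
instance (H : Int) (W : Int) (vp : Int) : Decidable (Pre_full_coverage_tiling H W vp) := by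
  unfold Pre_full_coverage_tiling; infer_instance

def pvWitness_full_coverage_tiling : Int × Int × Int := (40, 40, 15)

def Spec_full_coverage_tiling (H : Int) (W : Int) (vp : Int) (out : List (Int × Int × Int × Int)) : Prop := out = full_coverage_tiling_alt H W vp
instance (H : Int) (W : Int) (vp : Int) (out : List (Int × Int × Int × Int)) : Decidable (Spec_full_coverage_tiling H W vp out) := by unfold Spec_full_coverage_tiling; infer_instance

-- ===== CLAIM (what is proved, stated in full; the proofs are below) =====
def Claim_equal_full_coverage_tiling : Prop := ∀ (H : Int) (W : Int) (vp : Int), Dom_full_coverage_tiling H W vp → Pre_full_coverage_tiling H W vp → Spec_full_coverage_tiling H W vp (full_coverage_tiling H W vp)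

-- ===== LEMMAS AND PROOFS =====

-- every element of the generated prefix list is at most (m-1)*vp
lemma pv_mem_prefix_le {vp m x : Int} (hvp : 0 < vp)
    (hx : x ∈ (PySem.List.pyRange 0 m 1).map (fun i => i * vp)) : x ≤ (m-1) * vp := by
  rcases List.mem_map.mp hx with ⟨i, hi, rfl⟩
  rcases (PySem.List.mem_pyRange_one).mp hi with ⟨h0, h1⟩
  exact mul_le_mul_of_nonneg_right (by omega) (le_of_lt hvp)

-- once pos + vp ≥ dim the loop returns starts for any fuel
lemma pv_loop_stop (dim vp : Int) (fuel : Nat) (pos : Int) (s : List Int)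
    (h : ¬ pos + vp < dim) : pvTileLoop dim vp fuel pos s = s := by
  cases fuel <;> simp [pvTileLoop, h]

-- loop invariant: from pos = (m-1)*vp with starts = [0, vp, …, (m-1)vp], the loop
-- produces the closed-form list, provided fuel covers the remaining distance
lemma pv_loop_inv (dim vp N : Int) (hvp : 1 ≤ vp)
    (hN1 : (N - 1) * vp < dim - vp) (hN2 : dim - vp ≤ N * vp) :
    ∀ (fuel : Nat) (m : Int), 1 ≤ m → (m - 1) * vp < dim - vp →
      dim - vp - (m - 1) * vp ≤ (fuel : Int) →
      pvTileLoop dim vp fuel ((m - 1) * vp) ((PySem.List.pyRange 0 m 1).map (fun i => i * vp))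
        = ((PySem.List.pyRange 0 N 1).map (fun i => i * vp)) ++ [dim - vp] := by
  intro fuel
  induction fuel with
  | zero =>
    intro m _ hlt hfu
    exfalso; omega
  | succ f ih =>
    intro m hm hlt hfu
    have hcond : (m - 1) * vp + vp < dim := by omega
    have hmvp : (m - 1) * vp + vp = m * vp := by ring
    by_cases hc : m * vp < dim - vp
    · -- pos' = m*vp, strictly below the clamp
      have hmin : min ((m - 1) * vp + vp) (dim - vp) = m * vp := by
        rw [hmvp]; exact min_eq_left (le_of_lt hc)
      have hnotmem : m * vp ∉ (PySem.List.pyRange 0 m 1).map (fun i => i * vp) := by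
        intro hmem
        have := pv_mem_prefix_le (by omega) hmem
        have : (m - 1) * vp < m * vp :=
          mul_lt_mul_of_pos_right (by omega) (by omega)
        omega
      have happ : (PySem.List.pyRange 0 m 1).map (fun i => i * vp) ++ [m * vp]
          = (PySem.List.pyRange 0 (m + 1) 1).map (fun i => i * vp) := by
        rw [PySem.List.pyRange_one_succ_right (by omega), List.map_append]; rfl
      simp only [pvTileLoop, if_pos hcond, hmin, if_neg hnotmem]
      rw [happ]
      have hm1 : m * vp = (m + 1 - 1) * vp := by ring
      rw [hm1]
      exact ih (m + 1) (by omega) (by rw [← hm1]; exact hc) (by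
        have : (m + 1 - 1) * vp = (m - 1) * vp + vp := by ring
        omega)
    · -- pos' clamps to dim - vp; loop terminates next check, and m = N
      rw [not_lt] at hc
      have hmin : min ((m - 1) * vp + vp) (dim - vp) = dim - vp := by
        rw [hmvp]; exact min_eq_right hc
      have hnotmem : dim - vp ∉ (PySem.List.pyRange 0 m 1).map (fun i => i * vp) := by
        intro hmem
        have := pv_mem_prefix_le (by omega : (0:Int) < vp) hmem
        omega
      have hmN : m = N := by
        have h1 : N - 1 < m := by
          have : (N - 1) * vp < m * vp := lt_of_lt_of_le hN1 hc
          exact lt_of_mul_lt_mul_right this (by omega)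
        have h2 : m - 1 < N := by
          have : (m - 1) * vp < N * vp := lt_of_lt_of_le hlt hN2
          exact lt_of_mul_lt_mul_right this (by omega)
        omega
      simp only [pvTileLoop, if_pos hcond, hmin, if_neg hnotmem]
      rw [pv_loop_stop dim vp f (dim - vp) _ (by omega), hmN]

-- per-dimension equality of the two start-list computations
lemma pv_tileStarts_eq (dim vp : Int) (h : 1 ≤ vp ∨ dim ≤ vp) :
    pvTileStartsA dim vp = pvTileStartsB dim vp := by
  by_cases hd : dim ≤ vp
  · -- loop body never runs; both return [0]
    have hcond : ¬ (0 + vp < dim) := by omega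
    unfold pvTileStartsA pvTileStartsB
    rw [pv_loop_stop dim vp _ 0 [0] hcond, if_pos hd]
  · have hvp : 1 ≤ vp := by rcases h with h | h; exact h; exact absurd h hd
    have hlt : vp < dim := by omega
    set N : Int := -(PySem.Int.floordiv (-(dim - vp)) vp) with hNdef
    have hNspec : (N - 1) * vp < dim - vp ∧ dim - vp ≤ N * vp :=
      (PySem.Int.neg_floordiv_neg_eq_iff_of_pos (by omega)).mp hNdef.symm
    have hinit : (PySem.List.pyRange 0 1 1).map (fun i => i * vp) = [0] := by
      have : PySem.List.pyRange 0 1 1 = [0] := PySem.List.pyRange_one_singleton 0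
      rw [this]; simp
    have h0 : (0 : Int) = (1 - 1) * vp := by ring
    unfold pvTileStartsA pvTileStartsB
    rw [if_neg hd]
    calc pvTileLoop dim vp (dim.toNat + 1) 0 [0]
        = pvTileLoop dim vp (dim.toNat + 1) ((1 - 1) * vp)
            ((PySem.List.pyRange 0 1 1).map (fun i => i * vp)) := by rw [hinit, ← h0]
      _ = ((PySem.List.pyRange 0 N 1).map (fun i => i * vp)) ++ [dim - vp] := by
          exact pv_loop_inv dim vp N hvp hNspec.1 hNspec.2 (dim.toNat + 1) 1 le_rfl
            (by omega) (by omega)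

-- ===== VERDICT (by name: the statement is the Claim_ definition above) =====
theorem full_coverage_tiling_spec : Claim_equal_full_coverage_tiling := by
  intro H W vp _ hpre
  unfold Spec_full_coverage_tiling full_coverage_tiling full_coverage_tiling_alt
  have hH : pvTileStartsA H vp = pvTileStartsB H vp := by
    apply pv_tileStarts_eq; rcases hpre with h | h; exact Or.inl h; exact Or.inr h.1
  have hW : pvTileStartsA W vp = pvTileStartsB W vp := by
    apply pv_tileStarts_eq; rcases hpre with h | h; exact Or.inl h; exact Or.inr h.2
  rw [hH, hW]
  have hinner : (fun (acc : List (Int × Int × Int × Int)) (y : Int) =>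
      (pvTileStartsB W vp).foldl
        (fun acc2 x => acc2 ++ [(x, y, min vp (W - x), min vp (H - y))]) acc)
      = fun acc y => acc ++ (pvTileStartsB W vp).map
        (fun x => (x, y, min vp (W - x), min vp (H - y))) := by
    funext acc y
    exact PySem.List.foldl_append_singleton_eq_map _ _ _
  rw [hinner]
  rw [PySem.List.foldl_append_eq_flatMap]
  simp
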